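-- pv_equiv track=rewrite | github.com/theleeguy64-maker/Bridge-Hand-Generator | tests/test_deal_generator_section_c.py | _suits_of
-- ===== SOURCE A (Python) =====
-- from typing import Dict, List
--
-- def _suits_of(hand: List[str]) -> Dict[str, List[str]]:
--     suits = {"S": [], "H": [], "D": [], "C": []}
--     for card in hand:
--         if len(card) != 2:
--             continue
--         r, s = card[0], card[1]
--         if s in suits:
--             suits[s].append(r)
--     return suits
-- ===== SOURCE B (Python) =====
-- from typing import Dict, List
--
-- def _suits_of(hand: List[str]) -> Dict[str, List[str]]:
--     return {suit: [card[0] for card in hand if len(card) == 2 and card[1] == suit]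
--             for suit in "SHDC"}
-- ===== Notes on version B (the rewrite author's own statement) =====
-- stated objective: idiomatic
-- what changed: Replaced A's single dispatching pass updating a mutable four-bucket dict with a dict comprehension over the fixed suit string "SHDC" that makes one independent filtered scan of the hand per suit.
import Mathlib
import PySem

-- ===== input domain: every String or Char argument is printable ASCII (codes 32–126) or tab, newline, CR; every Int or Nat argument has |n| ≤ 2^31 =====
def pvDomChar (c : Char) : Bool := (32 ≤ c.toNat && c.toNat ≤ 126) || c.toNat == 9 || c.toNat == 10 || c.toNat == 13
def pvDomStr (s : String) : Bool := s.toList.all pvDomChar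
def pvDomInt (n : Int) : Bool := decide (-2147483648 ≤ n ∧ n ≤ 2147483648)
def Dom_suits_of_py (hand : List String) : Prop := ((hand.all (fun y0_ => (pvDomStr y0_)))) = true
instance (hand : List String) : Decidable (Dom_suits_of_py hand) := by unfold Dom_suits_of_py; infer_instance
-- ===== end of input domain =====

-- B replaces A's single dispatching pass over a mutable four-bucket dict with a dict
-- comprehension making one filtered scan of the hand per suit (idiomatic; same cost class).

-- ===== PORT A =====
-- loop body: 'if len(card) != 2: continue; r, s = card[0], card[1]' — a match on the
-- string's character list of length 2 is exactly this check plus the two indexings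
def suitsStepA (d : PySem.Dict String (List String)) (card : String) : PySem.Dict String (List String) :=
  match card.toList with
  | [rc, sc] =>
      let r := String.ofList [rc]
      let s := String.ofList [sc]
      if d.contains s then d.modify s [] (· ++ [r]) else d
  | _ => d

def suits_of_py (hand : List String) : List (String × List String) :=
  (hand.foldl suitsStepA
    (PySem.Dict.ofList [("S", ([] : List String)), ("H", []), ("D", []), ("C", [])])).items

-- ===== PORT B =====
-- [card[0] for card in hand if len(card) == 2 and card[1] == suit]
def ranksOfSuit (hand : List String) (suit : Char) : List String :=
  hand.filterMap (fun card =>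
    match card.toList with
    | [rc, sc] => if sc = suit then some (String.ofList [rc]) else none
    | _ => none)

-- {suit: … for suit in "SHDC"}: keys are the four distinct one-char strings, in order
def suits_of_py_alt (hand : List String) : List (String × List String) :=
  ("SHDC").toList.map (fun c => (String.ofList [c], ranksOfSuit hand c))

-- ===== PRECONDITION & SPEC =====
def Spec_suits_of_py (hand : List String) (out : List (String × List String)) : Prop := out = suits_of_py_alt hand
instance (hand : List String) (out : List (String × List String)) : Decidable (Spec_suits_of_py hand out) := by unfold Spec_suits_of_py; infer_instance

-- ===== CLAIM (what is proved, stated in full; the proofs are below) =====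
def Claim_equal_suits_of_py : Prop := ∀ (hand : List String), Dom_suits_of_py hand → Spec_suits_of_py hand (suits_of_py hand)

-- ===== LEMMAS AND PROOFS =====

lemma ofList_singleton_eq_iff (c d : Char) : String.ofList [c] = String.ofList [d] ↔ c = d := by
  constructor
  · intro h
    have := congrArg String.toList h
    simpa using this
  · intro h; rw [h]

-- the loop invariant: folding over a literal four-bucket dict appends the per-suit ranks
lemma fold_invariant (hand : List String) (a b c d : List String) :
    (hand.foldl suitsStepA (PySem.Dict.mk [("S", a), ("H", b), ("D", c), ("C", d)])).items =
      [("S", a ++ ranksOfSuit hand 'S'), ("H", b ++ ranksOfSuit hand 'H'),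
       ("D", c ++ ranksOfSuit hand 'D'), ("C", d ++ ranksOfSuit hand 'C')] := by
  induction hand generalizing a b c d with
  | nil => simp [ranksOfSuit]
  | cons card rest ih =>
    simp only [List.foldl_cons]
    have hrank : ∀ u : Char, ranksOfSuit (card :: rest) u =
        (match card.toList with
         | [rc, sc] => if sc = u then [String.ofList [rc]] else []
         | _ => []) ++ ranksOfSuit rest u := by
      intro u
      simp only [ranksOfSuit, List.filterMap_cons]
      rcases card.toList with _ | ⟨rc, _ | ⟨sc, _ | _⟩⟩ <;> simp <;> (try split_ifs) <;>
        simp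
    rcases hcs : card.toList with _ | ⟨rc, _ | ⟨sc, _ | ⟨x, xs⟩⟩⟩
    · simp only [suitsStepA, hcs]; rw [ih]; simp [hrank, hcs]
    · simp only [suitsStepA, hcs]; rw [ih]; simp [hrank, hcs]
    · -- length-2 card: dispatch on the suit character
      by_cases h1 : sc = 'S'
      · subst h1
        have : suitsStepA (PySem.Dict.mk [("S", a), ("H", b), ("D", c), ("C", d)]) card =
            PySem.Dict.mk [("S", a ++ [String.ofList [rc]]), ("H", b), ("D", c), ("C", d)] := by
          simp [suitsStepA, hcs, PySem.Dict.contains,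
            PySem.Dict.modify, PySem.Dict.insert, PySem.Dict.getD, PySem.Dict.get?, show String.ofList ['S'] = "S" from rfl]
        rw [this, ih]; simp [hrank, hcs]
      · by_cases h2 : sc = 'H'
        · subst h2
          have : suitsStepA (PySem.Dict.mk [("S", a), ("H", b), ("D", c), ("C", d)]) card =
              PySem.Dict.mk [("S", a), ("H", b ++ [String.ofList [rc]]), ("D", c), ("C", d)] := by
            simp [suitsStepA, hcs, PySem.Dict.contains,
              PySem.Dict.modify, PySem.Dict.insert, PySem.Dict.getD, PySem.Dict.get?, show String.ofList ['H'] = "H" from rfl]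
          rw [this, ih]; simp [hrank, hcs]
        · by_cases h3 : sc = 'D'
          · subst h3
            have : suitsStepA (PySem.Dict.mk [("S", a), ("H", b), ("D", c), ("C", d)]) card =
                PySem.Dict.mk [("S", a), ("H", b), ("D", c ++ [String.ofList [rc]]), ("C", d)] := by
              simp [suitsStepA, hcs, PySem.Dict.contains,
                PySem.Dict.modify, PySem.Dict.insert, PySem.Dict.getD, PySem.Dict.get?, show String.ofList ['D'] = "D" from rfl]
            rw [this, ih]; simp [hrank, hcs]
          · by_cases h4 : sc = 'C'
            · subst h4
              have : suitsStepA (PySem.Dict.mk [("S", a), ("H", b), ("D", c), ("C", d)]) card =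
                  PySem.Dict.mk [("S", a), ("H", b), ("D", c), ("C", d ++ [String.ofList [rc]])] := by
                simp [suitsStepA, hcs, PySem.Dict.contains,
                  PySem.Dict.modify, PySem.Dict.insert, PySem.Dict.getD, PySem.Dict.get?, show String.ofList ['C'] = "C" from rfl]
              rw [this, ih]; simp [hrank, hcs]
            · have : suitsStepA (PySem.Dict.mk [("S", a), ("H", b), ("D", c), ("C", d)]) card =
                  PySem.Dict.mk [("S", a), ("H", b), ("D", c), ("C", d)] := by
                simp only [suitsStepA, hcs]
                rw [if_neg]
                simp only [PySem.Dict.contains]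
                simp [show ("S" : String) = String.ofList ['S'] from rfl,
                  show ("H" : String) = String.ofList ['H'] from rfl,
                  show ("D" : String) = String.ofList ['D'] from rfl,
                  show ("C" : String) = String.ofList ['C'] from rfl]
                exact ⟨fun h => h1 ((ofList_singleton_eq_iff sc 'S').mp h.symm),
                  fun h => h2 ((ofList_singleton_eq_iff sc 'H').mp h.symm),
                  fun h => h3 ((ofList_singleton_eq_iff sc 'D').mp h.symm),
                  fun h => h4 ((ofList_singleton_eq_iff sc 'C').mp h.symm)⟩
              rw [this, ih]
              simp [hrank, hcs, h1, h2, h3, h4]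
    · simp only [suitsStepA, hcs]; rw [ih]; simp [hrank, hcs]

lemma init_eq : (PySem.Dict.ofList [("S", ([] : List String)), ("H", []), ("D", []), ("C", [])]) =
    PySem.Dict.mk [("S", []), ("H", []), ("D", []), ("C", [])] := by decide

-- ===== VERDICT (by name: the statement is the Claim_ definition above) =====
theorem suits_of_py_spec : Claim_equal_suits_of_py := by
  intro hand _
  show suits_of_py hand = suits_of_py_alt hand
  rw [suits_of_py, init_eq, fold_invariant]
  simp [suits_of_py_alt, show ("SHDC" : String).toList = ['S', 'H', 'D', 'C'] from rfl]
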